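-- pv_equiv track=rewrite | github.com/jhc20/battlesnake-python | app/main.py | wallHump
-- ===== SOURCE A (Python) =====
-- def directionalCoordinate(direction, withRespectTo):
--     x = withRespectTo[0]
--     y = withRespectTo[1]
--     if(direction == 'up'):
--         return (x, y-1)
--     elif(direction == 'down'):
--         return (x, y+1)
--     elif(direction == 'right'):
--         return (x+1, y)
--     elif(direction == 'left'):
--         return (x-1, y)
--
-- def getDirectionsCanGo(head, turnDictionary):
--     canGo = []
--     x = head[0]
--     y = head[1]
--     right = (x+1, y)
--     left = (x-1, y)
--     up = (x, y-1)
--     down = (x, y+1)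
--     if right in turnDictionary.keys():
--         canGo.append('right')
--     if left in turnDictionary.keys():
--         canGo.append('left')
--     if up in turnDictionary.keys():
--         canGo.append('up')
--     if down in turnDictionary.keys():
--         canGo.append('down')
--     return canGo
--
-- def wallHump(dirsFromHead, head, otherNodes):
--     dirMap = {}
--     for dir in dirsFromHead:
--         dirMap[dir] = len(getDirectionsCanGo(directionalCoordinate(dir, head), otherNodes))#getSpacesAround(dir, start, otherNodes)
--     for dir in dirMap:
--         if dirMap[dir] == 1:#2:
--             return dir
--     for dir in dirMap:
--         if dirMap[dir] == 2:#1: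
--             return dir
--     for dir in dirMap:
--         if dirMap[dir] == 3:#3:
--             return dir
-- ===== SOURCE B (Python) =====
-- OFFSETS = {'up': (0, -1), 'down': (0, 1), 'right': (1, 0), 'left': (-1, 0)}
--
-- def wallHump(dirsFromHead, head, otherNodes):
--     # build the occupied-key set once; score each direction by counting its
--     # target cell's occupied neighbours arithmetically; keep the direction with
--     # the smallest count in 1..3 (strict '<' so the first direction wins ties)
--     occupied = set(otherNodes)
--     hx, hy = head[0], head[1]
--     best = None
--     for d in dirsFromHead:
--         dx, dy = OFFSETS[d]
--         tx, ty = hx + dx, hy + dy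
--         c = sum((tx + ex, ty + ey) in occupied for ex, ey in ((1, 0), (-1, 0), (0, -1), (0, 1)))
--         if 1 <= c <= 3 and (best is None or c < best[0]):
--             best = (c, d)
--     return None if best is None else best[1]
-- ===== Notes on version B (the rewrite author's own statement) =====
-- stated objective: alternative
-- what changed: B builds the occupied-key set once and scores each direction arithmetically (counting the target cell's occupied neighbours over four offsets), then selects in a single accumulator pass the direction with the smallest count in {1,2,3} (strict '<' keeps first-occurrence ties), replacing A's dict-building pass followed by three sequential scans for count==1, ==2, ==3.
import Mathlib
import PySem

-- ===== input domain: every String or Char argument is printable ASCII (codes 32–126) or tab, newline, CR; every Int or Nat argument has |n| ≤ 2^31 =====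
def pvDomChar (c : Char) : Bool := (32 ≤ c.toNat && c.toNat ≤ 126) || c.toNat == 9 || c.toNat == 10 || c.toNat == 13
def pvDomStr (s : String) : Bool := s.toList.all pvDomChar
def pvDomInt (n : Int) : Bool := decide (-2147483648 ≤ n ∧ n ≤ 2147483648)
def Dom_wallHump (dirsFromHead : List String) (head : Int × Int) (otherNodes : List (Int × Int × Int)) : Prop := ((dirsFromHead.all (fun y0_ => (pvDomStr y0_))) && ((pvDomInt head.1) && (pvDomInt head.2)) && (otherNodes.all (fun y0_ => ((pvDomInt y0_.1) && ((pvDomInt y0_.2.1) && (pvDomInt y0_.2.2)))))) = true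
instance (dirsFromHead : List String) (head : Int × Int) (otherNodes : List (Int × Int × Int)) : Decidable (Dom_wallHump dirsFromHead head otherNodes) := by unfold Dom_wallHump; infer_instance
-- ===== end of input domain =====

-- B builds the occupied-key set once, scores each direction by an arithmetic neighbour count over
-- four offsets, and picks the smallest qualifying count (in {1,2,3}) in one accumulator pass,
-- instead of A's dict of counts scanned three times (==1, ==2, ==3); same cost, different shape.


-- ===== PORT A =====
-- directionalCoordinate: none exactly where the Python function falls through and returns None
def directionalCoordinate (direction : String) (withRespectTo : Int × Int) : Option (Int × Int) :=
  let x := withRespectTo.1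
  let y := withRespectTo.2
  if direction = "up" then some (x, y - 1)
  else if direction = "down" then some (x, y + 1)
  else if direction = "right" then some (x + 1, y)
  else if direction = "left" then some (x - 1, y)
  else none

-- `coord in turnDictionary.keys()`: key membership in the dict given as an association list
def inKeys (turnDictionary : List (Int × Int × Int)) (c : Int × Int) : Bool :=
  turnDictionary.any (fun p => p.1 == c.1 && p.2.1 == c.2)

def getDirectionsCanGo (head : Int × Int) (turnDictionary : List (Int × Int × Int)) : List String :=
  let canGo : List String := []
  let x := head.1
  let y := head.2
  let canGo := if inKeys turnDictionary (x + 1, y) then canGo ++ ["right"] else canGo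
  let canGo := if inKeys turnDictionary (x - 1, y) then canGo ++ ["left"] else canGo
  let canGo := if inKeys turnDictionary (x, y - 1) then canGo ++ ["up"] else canGo
  let canGo := if inKeys turnDictionary (x, y + 1) then canGo ++ ["down"] else canGo
  canGo

-- len(getDirectionsCanGo(directionalCoordinate(dir, head), otherNodes)); 0 on the `none`
-- branch, where the Python raises TypeError (excluded by Pre_)
def dirCount (head : Int × Int) (otherNodes : List (Int × Int × Int)) (dir : String) : Int :=
  match directionalCoordinate dir head with
  | some c => (getDirectionsCanGo c otherNodes).length
  | none => 0

def wallHump (dirsFromHead : List String) (head : Int × Int) (otherNodes : List (Int × Int × Int)) : Option String :=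
  let dirMap : PySem.Dict String Int :=
    dirsFromHead.foldl (fun d dir => d.insert dir (dirCount head otherNodes dir)) PySem.Dict.empty
  match dirMap.items.find? (fun p => p.2 == 1) with
  | some p => some p.1
  | none =>
    match dirMap.items.find? (fun p => p.2 == 2) with
    | some p => some p.1
    | none =>
      match dirMap.items.find? (fun p => p.2 == 3) with
      | some p => some p.1
      | none => none

-- ===== PORT B =====
-- the OFFSETS dict literal of Source B (looked up, never iterated)
def pvOffsets : List (String × (Int × Int)) :=
  [("up", (0, -1)), ("down", (0, 1)), ("right", (1, 0)), ("left", (-1, 0))]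

-- the neighbour-offset tuple ((1,0),(-1,0),(0,-1),(0,1)) of Source B
def pvNbrs : List (Int × Int) := [(1, 0), (-1, 0), (0, -1), (0, 1)]

-- one step of Source B's loop; the `none` lookup branch is where Python raises KeyError (outside Pre_)
def humpStep (occupied : PySem.Set (Int × Int)) (hx hy : Int)
    (best : Option (Int × String)) (d : String) : Option (Int × String) :=
  match pvOffsets.lookup d with
  | none => best
  | some (dx, dy) =>
    let tx := hx + dx
    let ty := hy + dy
    let c : Int := (pvNbrs.countP (fun e => occupied.contains (tx + e.1, ty + e.2)) : Nat)
    if (decide (1 ≤ c) && decide (c ≤ 3) &&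
        (match best with | none => true | some b => decide (c < b.1))) then some (c, d) else best

def wallHump_alt (dirsFromHead : List String) (head : Int × Int) (otherNodes : List (Int × Int × Int)) : Option String :=
  let occupied : PySem.Set (Int × Int) :=
    PySem.Set.ofList (otherNodes.map (fun p => (p.1, p.2.1)))
  match dirsFromHead.foldl (humpStep occupied head.1 head.2) none with
  | none => none
  | some b => some b.2

-- ===== PRECONDITION & SPEC =====
-- Pre_ excludes exactly the inputs where the Python A raises (TypeError): a string in
-- dirsFromHead that is not one of the four directions, on which directionalCoordinate
-- returns None and getDirectionsCanGo subscripts it. B raises there too (KeyError).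
def Pre_wallHump (dirsFromHead : List String) (head : Int × Int) (otherNodes : List (Int × Int × Int)) : Prop :=
  ∀ d ∈ dirsFromHead, d = "up" ∨ d = "down" ∨ d = "right" ∨ d = "left"
instance (dirsFromHead : List String) (head : Int × Int) (otherNodes : List (Int × Int × Int)) : Decidable (Pre_wallHump dirsFromHead head otherNodes) := by unfold Pre_wallHump; infer_instance

def pvWitness_wallHump : List String × (Int × Int) × (List (Int × Int × Int)) :=
  (["up", "left"], (3, 3), [(4, 3, 1), (2, 3, 2), (3, 2, 3)])

def Spec_wallHump (dirsFromHead : List String) (head : Int × Int) (otherNodes : List (Int × Int × Int)) (out : Option String) : Prop := out = wallHump_alt dirsFromHead head otherNodes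
instance (dirsFromHead : List String) (head : Int × Int) (otherNodes : List (Int × Int × Int)) (out : Option String) : Decidable (Spec_wallHump dirsFromHead head otherNodes out) := by unfold Spec_wallHump; infer_instance

-- ===== CLAIM (what is proved, stated in full; the proofs are below) =====
def Claim_equal_wallHump : Prop := ∀ (dirsFromHead : List String) (head : Int × Int) (otherNodes : List (Int × Int × Int)), Dom_wallHump dirsFromHead head otherNodes → Pre_wallHump dirsFromHead head otherNodes → Spec_wallHump dirsFromHead head otherNodes (wallHump dirsFromHead head otherNodes)

-- ===== LEMMAS AND PROOFS =====

-- abstract min-selection step (proof device: humpStep with the score function abstracted)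
def selStep (f : String → Int) (best : Option (Int × String)) (d : String) : Option (Int × String) :=
  let c := f d
  if (decide (1 ≤ c) && decide (c ≤ 3) &&
      (match best with | none => true | some b => decide (c < b.1))) then some (c, d) else best

theorem B_one (f : String → Int) (l : List String) (d0 : String) :
    l.foldl (selStep f) (some (1, d0)) = some (1, d0) := by
  induction l with
  | nil => rfl
  | cons k l ih =>
    have h : selStep f (some (1, d0)) k = some (1, d0) := by
      simp only [selStep]
      have : ¬ (1 ≤ f k ∧ f k ≤ 3 ∧ f k < 1) := by omega
      simp_all
    simp [h, ih]

theorem B_two (f : String → Int) (l : List String) (d0 : String) :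
    l.foldl (selStep f) (some (2, d0)) =
      match l.find? (fun k => f k == 1) with
      | some k => some (1, k)
      | none => some (2, d0) := by
  induction l with
  | nil => rfl
  | cons k l ih =>
    by_cases h1 : f k = 1
    · have h : selStep f (some (2, d0)) k = some (1, k) := by
        simp only [selStep]; simp [h1]
      simp [List.find?, h1, h, B_one]
    · have h : selStep f (some (2, d0)) k = some (2, d0) := by
        simp only [selStep]
        have : ¬ (1 ≤ f k ∧ f k ≤ 3 ∧ f k < 2) := by omega
        simp_all
      have h2 : (f k == 1) = false := by simp [h1]
      simp [List.find?, h2, h, ih]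

theorem B_three (f : String → Int) (l : List String) (d0 : String) :
    l.foldl (selStep f) (some (3, d0)) =
      match l.find? (fun k => f k == 1) with
      | some k => some (1, k)
      | none =>
        match l.find? (fun k => f k == 2) with
        | some k => some (2, k)
        | none => some (3, d0) := by
  induction l with
  | nil => rfl
  | cons k l ih =>
    by_cases h1 : f k = 1
    · have h : selStep f (some (3, d0)) k = some (1, k) := by
        simp only [selStep]; simp [h1]
      simp [List.find?, h1, h, B_one]
    · by_cases h2 : f k = 2
      · have h : selStep f (some (3, d0)) k = some (2, k) := by
          simp only [selStep]; simp [h2]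
        have e1 : (f k == 1) = false := by simp [h1]
        have e2 : (f k == 2) = true := by simp [h2]
        rw [List.foldl_cons, h, B_two]
        cases hf1 : List.find? (fun k => f k == 1) l with
        | some k1 => simp [List.find?, e1, hf1]
        | none => simp [List.find?, e1, e2, hf1]
      · have h : selStep f (some (3, d0)) k = some (3, d0) := by
          simp only [selStep]
          have : ¬ (1 ≤ f k ∧ f k ≤ 3 ∧ f k < 3) := by omega
          simp_all
        have e1 : (f k == 1) = false := by simp [h1]
        have e2 : (f k == 2) = false := by simp [h2]
        simp [List.find?, e1, e2, h, ih]

theorem B_gen (f : String → Int) (l : List String) :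
    (l.foldl (selStep f) none).map (·.2) =
      ((l.find? (fun k => f k == 1)).orElse
        (fun _ => (l.find? (fun k => f k == 2)).orElse
          (fun _ => l.find? (fun k => f k == 3)))) := by
  induction l with
  | nil => rfl
  | cons k l ih =>
    by_cases h1 : f k = 1
    · have h : selStep f none k = some (1, k) := by
        simp only [selStep]; simp [h1]
      have e1 : (f k == 1) = true := by simp [h1]
      simp [List.find?, e1, h, B_one]
    · by_cases h2 : f k = 2
      · have h : selStep f none k = some (2, k) := by
          simp only [selStep]; simp [h2]
        have e1 : (f k == 1) = false := by simp [h1]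
        have e2 : (f k == 2) = true := by simp [h2]
        rw [List.foldl_cons, h, B_two]
        cases hf1 : List.find? (fun k => f k == 1) l with
        | some k1 => simp [List.find?, e1, hf1]
        | none => simp [List.find?, e1, e2, hf1]
      · by_cases h3 : f k = 3
        · have h : selStep f none k = some (3, k) := by
            simp only [selStep]; simp [h3]
          have e1 : (f k == 1) = false := by simp [h1]
          have e2 : (f k == 2) = false := by simp [h2]
          have e3 : (f k == 3) = true := by simp [h3]
          rw [List.foldl_cons, h, B_three]
          cases hf1 : List.find? (fun k => f k == 1) l with
          | some k1 => simp [List.find?, e1, hf1]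
          | none =>
            cases hf2 : List.find? (fun k => f k == 2) l with
            | some k2 => simp [List.find?, e1, e2, hf1, hf2]
            | none => simp [List.find?, e1, e2, e3, hf1, hf2]
        · have h : selStep f none k = none := by
            simp only [selStep]
            have : ¬ (1 ≤ f k ∧ f k ≤ 3) := by omega
            simp_all
          have e1 : (f k == 1) = false := by simp [h1]
          have e2 : (f k == 2) = false := by simp [h2]
          have e3 : (f k == 3) = false := by simp [h3]
          simp [List.find?, e1, e2, e3, h, ih]

theorem A_gen (f : String → Int) (v : Int) (l : List String) :
    ∀ (d : PySem.Dict String Int), (∀ p ∈ d.items, p.2 = f p.1) →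
      (l.foldl (fun d dir => d.insert dir (f dir)) d).items.find? (fun p => p.2 == v) =
        ((d.items.find? (fun p => p.2 == v)).orElse
          (fun _ => (l.find? (fun k => f k == v && !(d.contains k))).map (fun k => (k, f k)))) := by
  induction l with
  | nil => intro d hd; simp
  | cons k l ih =>
    intro d hd
    have hd' : ∀ p ∈ (d.insert k (f k)).items, p.2 = f p.1 := by
      intro p hp
      rcases (PySem.Dict.mem_items_insert d k (f k) p).1 hp with h | ⟨h, _⟩
      · rw [h]
      · exact hd p h
    rw [List.foldl_cons, ih _ hd']
    by_cases hc : d.contains k = true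
    · have hitems : (d.insert k (f k)).items = d.items := by
        rw [PySem.Dict.items_insert_of_contains d (f k) hc]
        calc d.items.map (fun p => if (p.1 == k) = true then (k, f k) else p)
            = d.items.map id := by
              apply List.map_congr_left
              intro p hp
              by_cases he : p.1 = k
              · have hb : (p.1 == k) = true := by simp [he]
                simp only [hb, if_true, id_eq]
                rw [← he, ← hd p hp]
              · simp [he]
          _ = d.items := List.map_id _
      have hcont : (fun k' => f k' == v && !((d.insert k (f k)).contains k'))
          = (fun k' => f k' == v && !(d.contains k')) := by
        funext k'
        rw [PySem.Dict.contains_insert]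
        by_cases he : k' = k
        · subst he; simp [hc]
        · have hb : (k' == k) = false := by simp [he]
          simp [hb]
      have hhead : ¬ ((fun k' => f k' == v && !(d.contains k')) k = true) := by simp [hc]
      rw [hitems, hcont,
        List.find?_cons_of_neg (p := fun k' => f k' == v && !(d.contains k')) hhead]
    · have hcf : d.contains k = false := by simpa using hc
      have hitems : (d.insert k (f k)).items = d.items ++ [(k, f k)] :=
        PySem.Dict.items_insert_of_not_contains d (f k) hcf
      rw [hitems, List.find?_append]
      by_cases hv : f k = v
      · have hev : ((fun (p : String × Int) => p.2 == v) (k, f k)) = true := by simp [hv]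
        have h1 : List.find? (fun p => p.2 == v) [(k, f k)] = some (k, f k) :=
          List.find?_cons_of_pos (p := fun (p : String × Int) => p.2 == v) hev
        have hhead : ((fun k' => f k' == v && !(d.contains k')) k) = true := by
          simp [hcf, hv]
        rw [List.find?_cons_of_pos (p := fun k' => f k' == v && !(d.contains k')) hhead, h1]
        cases hdf : d.items.find? (fun p => p.2 == v) with
        | some p => simp [hdf]
        | none => simp [hdf]
      · have hev : ¬ (((fun (p : String × Int) => p.2 == v) (k, f k)) = true) := by simp [hv]
        have h1 : List.find? (fun p => p.2 == v) [(k, f k)] = none := by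
          rw [List.find?_cons_of_neg (p := fun (p : String × Int) => p.2 == v) hev]; rfl
        have hcont : (fun k' => f k' == v && !((d.insert k (f k)).contains k'))
            = (fun k' => f k' == v && !(d.contains k')) := by
          funext k'
          rw [PySem.Dict.contains_insert]
          by_cases he : k' = k
          · have hb : (f k' == v) = false := by simp [he, hv]
            simp [hb]
          · have hb : (k' == k) = false := by simp [he]
            simp [hb]
        have hhead : ¬ (((fun k' => f k' == v && !(d.contains k')) k) = true) := by simp [hv]
        rw [h1, List.find?_cons_of_neg (p := fun k' => f k' == v && !(d.contains k')) hhead, hcont]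
        cases hdf : d.items.find? (fun p => p.2 == v) with
        | some p => simp [hdf]
        | none => simp [hdf]

-- A's three scans of the count dict, as three find?s over dirsFromHead
theorem A_find (f : String → Int) (l : List String) :
    (match (l.foldl (fun d dir => d.insert dir (f dir)) PySem.Dict.empty).items.find? (fun p => p.2 == 1) with
      | some p => some p.1
      | none =>
        match (l.foldl (fun d dir => d.insert dir (f dir)) PySem.Dict.empty).items.find? (fun p => p.2 == 2) with
        | some p => some p.1
        | none =>
          match (l.foldl (fun d dir => d.insert dir (f dir)) PySem.Dict.empty).items.find? (fun p => p.2 == 3) with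
          | some p => some p.1
          | none => none) =
      ((l.find? (fun k => f k == 1)).orElse
        (fun _ => (l.find? (fun k => f k == 2)).orElse
          (fun _ => l.find? (fun k => f k == 3)))) := by
  have e : ∀ v : Int,
      (l.foldl (fun d dir => d.insert dir (f dir)) PySem.Dict.empty).items.find? (fun p => p.2 == v) =
        (l.find? (fun k => f k == v)).map (fun k => (k, f k)) := by
    intro v
    rw [A_gen f v l (PySem.Dict.empty : PySem.Dict String Int) (by intro p hp; simp [show (PySem.Dict.empty : PySem.Dict String Int).items = [] from rfl] at hp)]
    have hcond : (fun k => f k == v && !((PySem.Dict.empty : PySem.Dict String Int).contains k)) = (fun k => f k == v) := by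
      funext k; simp [PySem.Dict.contains_empty]
    have hnil : (PySem.Dict.empty : PySem.Dict String Int).items.find? (fun p => p.2 == v) = none := rfl
    rw [hnil, hcond]
    rfl
  rw [e 1, e 2, e 3]
  cases hf1 : l.find? (fun k => f k == 1) with
  | some k1 => simp
  | none =>
    cases hf2 : l.find? (fun k => f k == 2) with
    | some k2 => simp
    | none =>
      cases hf3 : l.find? (fun k => f k == 3) with
      | some k3 => simp
      | none => simp

-- set membership of B's occupied set = A's key membership test
theorem contains_eq (otherNodes : List (Int × Int × Int)) (c : Int × Int) :
    (PySem.Set.ofList (otherNodes.map (fun p => (p.1, p.2.1)))).contains c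
      = inKeys otherNodes c := by
  rcases c with ⟨cx, cy⟩
  rw [Bool.eq_iff_iff]
  simp [PySem.Set.mem_ofList, List.mem_map, inKeys, List.any_eq_true, Prod.ext_iff]

-- B's arithmetic neighbour count = length of A's canGo list, at any target cell
theorem count_eq (otherNodes : List (Int × Int × Int)) (tx ty : Int) :
    ((pvNbrs.countP (fun e =>
        (PySem.Set.ofList (otherNodes.map (fun p => (p.1, p.2.1)))).contains
          (tx + e.1, ty + e.2)) : Nat) : Int)
      = ((getDirectionsCanGo (tx, ty) otherNodes).length : Int) := by
  have hc : ∀ e : Int × Int,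
      (PySem.Set.ofList (otherNodes.map (fun p => (p.1, p.2.1)))).contains (tx + e.1, ty + e.2)
        = inKeys otherNodes (tx + e.1, ty + e.2) := fun e => contains_eq otherNodes _
  simp only [pvNbrs, List.countP_cons, List.countP_nil, hc, getDirectionsCanGo]
  have e0 : ∀ a : Int, a + 0 = a := fun a => by ring
  have em : ∀ a : Int, a + -1 = a - 1 := fun a => by ring
  rw [e0 tx, e0 ty, em tx, em ty]
  cases h1 : inKeys otherNodes (tx + 1, ty) <;>
  cases h2 : inKeys otherNodes (tx - 1, ty) <;>
  cases h3 : inKeys otherNodes (tx, ty - 1) <;>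
  cases h4 : inKeys otherNodes (tx, ty + 1) <;>
    simp_all

-- one step of B's loop agrees with the abstract selection step on A's count
theorem step_eq (hx hy dx dy : Int) (otherNodes : List (Int × Int × Int))
    (best : Option (Int × String)) (d : String)
    (hl : pvOffsets.lookup d = some (dx, dy))
    (hc : directionalCoordinate d (hx, hy) = some (hx + dx, hy + dy)) :
    humpStep (PySem.Set.ofList (otherNodes.map (fun p => (p.1, p.2.1)))) hx hy best d
      = selStep (dirCount (hx, hy) otherNodes) best d := by
  simp only [humpStep, hl, selStep, dirCount, hc]
  rw [count_eq otherNodes (hx + dx) (hy + dy)]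

-- on the four legal direction strings, one step of B's loop is selStep of A's count
theorem humpStep_eq (head : Int × Int) (otherNodes : List (Int × Int × Int))
    (best : Option (Int × String)) (d : String)
    (hd : d = "up" ∨ d = "down" ∨ d = "right" ∨ d = "left") :
    humpStep (PySem.Set.ofList (otherNodes.map (fun p => (p.1, p.2.1)))) head.1 head.2 best d
      = selStep (dirCount head otherNodes) best d := by
  rcases hd with h | h | h | h <;> subst h
  · exact step_eq head.1 head.2 0 (-1) otherNodes best "up" rfl
      (by simp [directionalCoordinate]; try omega)
  · exact step_eq head.1 head.2 0 1 otherNodes best "down" rfl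
      (by simp [directionalCoordinate]; try omega)
  · exact step_eq head.1 head.2 1 0 otherNodes best "right" rfl
      (by simp [directionalCoordinate]; try omega)
  · exact step_eq head.1 head.2 (-1) 0 otherNodes best "left" rfl
      (by simp [directionalCoordinate]; try omega)

theorem humpStep_eq' (head : Int × Int) (otherNodes : List (Int × Int × Int))
    (l : List String) (h : ∀ d ∈ l, d = "up" ∨ d = "down" ∨ d = "right" ∨ d = "left") :
    l.foldl (humpStep (PySem.Set.ofList (otherNodes.map (fun p => (p.1, p.2.1)))) head.1 head.2) none
      = l.foldl (selStep (dirCount head otherNodes)) none := by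
  apply PySem.List.foldl_congr_mem
  intro acc x hx
  exact humpStep_eq head otherNodes acc x (h x hx)

-- ===== VERDICT (by name: the statement is the Claim_ definition above) =====
theorem wallHump_spec : Claim_equal_wallHump := by
  intro dirsFromHead head otherNodes _ hpre
  unfold Spec_wallHump wallHump
  have hB : wallHump_alt dirsFromHead head otherNodes
      = (dirsFromHead.foldl (selStep (dirCount head otherNodes)) none).map (·.2) := by
    show (match dirsFromHead.foldl
        (humpStep (PySem.Set.ofList (otherNodes.map (fun p => (p.1, p.2.1)))) head.1 head.2)
        none with
      | none => none
      | some b => some b.2) = _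
    rw [humpStep_eq' head otherNodes dirsFromHead hpre]
    cases dirsFromHead.foldl (selStep (dirCount head otherNodes)) none <;> rfl
  rw [hB, A_find (dirCount head otherNodes) dirsFromHead,
    ← B_gen (dirCount head otherNodes) dirsFromHead]
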